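-- pv_equiv track=rewrite | github.com/bxparks/AceTimeTools | src/acetimetools/generator/argenerator.py | compressed_name_to_c_string
-- ===== SOURCE A (Python) =====
-- def compressed_name_to_c_string(compressed_name: str) -> str:
--     """Convert a compressed name (with fragment references) to a string that
--     the C++ compiler will accept. The primary reason for this function is
--     because the hex escape sequence (\\xHH) in C/C++ has no length limit, so
--     will happily run into the characters after the HH. So we have to break
--     those references into separate strings. Example: converts ("\x01ab")
--     into ("\x01" "ab").
--     """
--     rendered_string = ''
--     in_normal_string = False
--     for c in compressed_name:
--         if ord(c) < 0x20:
--             if in_normal_string: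
--                 rendered_string += f'" "\\x{ord(c):02x}" '
--                 in_normal_string = False
--             else:
--                 rendered_string += f'"\\x{ord(c):02x}" '
--         else:
--             if in_normal_string:
--                 rendered_string += c
--             else:
--                 rendered_string += f'"{c}'
--             in_normal_string = True
--     if in_normal_string:
--         rendered_string += '"'
--     return rendered_string.strip()
-- ===== SOURCE B (Python) =====
-- from itertools import groupby
--
--
-- def compressed_name_to_c_string(compressed_name: str) -> str:
--     tokens = []
--     for is_ctrl, group in groupby(compressed_name, key=lambda c: ord(c) < 0x20):
--         if is_ctrl:
--             tokens.extend(f'"\\x{ord(c):02x}"' for c in group)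
--         else:
--             tokens.append('"' + ''.join(group) + '"')
--     return ' '.join(tokens)
-- ===== Notes on version B (the rewrite author's own statement) =====
-- stated objective: idiomatic
-- what changed: Replaces A's flag-based state machine that concatenates into one growing string and strips a trailing space at the end by a grouping decomposition: split the input into maximal runs via itertools.groupby, render each control char as one escape token and each normal run as one quoted token, and join the token list with single spaces.
import Mathlib
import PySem

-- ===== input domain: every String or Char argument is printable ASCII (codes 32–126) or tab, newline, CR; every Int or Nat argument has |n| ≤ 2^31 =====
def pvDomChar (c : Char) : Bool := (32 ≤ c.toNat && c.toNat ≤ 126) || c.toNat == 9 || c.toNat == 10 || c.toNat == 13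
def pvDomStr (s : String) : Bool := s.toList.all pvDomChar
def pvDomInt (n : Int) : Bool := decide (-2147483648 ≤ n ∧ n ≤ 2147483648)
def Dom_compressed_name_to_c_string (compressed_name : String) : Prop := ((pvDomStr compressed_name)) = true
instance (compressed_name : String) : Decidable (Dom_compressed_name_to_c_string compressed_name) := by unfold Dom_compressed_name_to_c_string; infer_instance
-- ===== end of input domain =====

-- B replaces A's flag-based state machine (build one big string, strip at the end) by a
-- grouping decomposition: split the input into maximal runs, render each run as token(s),
-- join with single spaces (objective: more idiomatic; same linear cost).

-- ===== PORT A =====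
-- lowercase hex digit of n < 16; exact for this range (Python's '%02x' digit)
def pvHexDigit (n : Nat) : Char := if n < 10 then Char.ofNat (48 + n) else Char.ofNat (87 + n)
-- the two hex digits of f'{ord(c):02x}'; exact since ord(c) < 0x20 < 0x100
def pvHex2 (c : Char) : List Char := [pvHexDigit (c.toNat / 16), pvHexDigit (c.toNat % 16)]

-- one step of A's loop; state = (rendered_string, in_normal_string)
def pvStepA (acc : List Char × Bool) (c : Char) : List Char × Bool :=
  if c.toNat < 0x20 then
    if acc.2 then (acc.1 ++ ['"', ' ', '"', '\\', 'x'] ++ pvHex2 c ++ ['"', ' '], false)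
    else (acc.1 ++ ['"', '\\', 'x'] ++ pvHex2 c ++ ['"', ' '], false)
  else
    if acc.2 then (acc.1 ++ [c], true)
    else (acc.1 ++ ['"', c], true)

def compressed_name_to_c_string (compressed_name : String) : String :=
  let r := compressed_name.toList.foldl pvStepA ([], false)
  let r1 := if r.2 then r.1 ++ ['"'] else r.1
  String.ofList (PySem.Chars.strip r1)

-- ===== PORT B =====
-- token for one control char: f'"\\x{ord(c):02x}"'
def pvEscTok (c : Char) : List Char := ['"', '\\', 'x'] ++ pvHex2 c ++ ['"']

-- groupby(key = ord(c) < 0x20): a control run yields one escape token per char,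
-- a normal run yields one quoted token
def pvTokens : List Char → List (List Char)
  | [] => []
  | c :: cs =>
    if c.toNat < 0x20 then pvEscTok c :: pvTokens cs
    else ('"' :: c :: cs.takeWhile (fun x => !(x.toNat < 0x20)) ++ ['"'])
         :: pvTokens (cs.dropWhile (fun x => !(x.toNat < 0x20)))
termination_by cs => cs.length
decreasing_by
  · simp
  · have := List.length_dropWhile_le (fun x => !(x.toNat < 0x20)) cs
    simp; omega

def compressed_name_to_c_string_alt (compressed_name : String) : String :=
  String.ofList (PySem.Chars.join [' '] (pvTokens compressed_name.toList))

-- ===== PRECONDITION & SPEC =====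
def Spec_compressed_name_to_c_string (compressed_name : String) (out : String) : Prop := out = compressed_name_to_c_string_alt compressed_name
instance (compressed_name : String) (out : String) : Decidable (Spec_compressed_name_to_c_string compressed_name out) := by unfold Spec_compressed_name_to_c_string; infer_instance

-- ===== CLAIM (what is proved, stated in full; the proofs are below) =====
def Claim_equal_compressed_name_to_c_string : Prop := ∀ (compressed_name : String), Dom_compressed_name_to_c_string compressed_name → Spec_compressed_name_to_c_string compressed_name (compressed_name_to_c_string compressed_name)

-- ===== LEMMAS AND PROOFS =====

-- what A's loop appends from flag b onwards, including the final closing quote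
def pvRawA : Bool → List Char → List Char
  | b, [] => if b then ['"'] else []
  | b, c :: cs =>
    if c.toNat < 0x20 then
      (if b then ['"', ' ', '"', '\\', 'x'] ++ pvHex2 c ++ ['"', ' ']
       else ['"', '\\', 'x'] ++ pvHex2 c ++ ['"', ' ']) ++ pvRawA false cs
    else (if b then [c] else ['"', c]) ++ pvRawA true cs

-- the trailing space A's raw string carries iff the last char is a control char
def pvTail : List Char → List Char
  | [] => []
  | [c] => if c.toNat < 0x20 then [' '] else []
  | _ :: c :: cs => pvTail (c :: cs)

def pvJ (cs : List Char) : List Char := PySem.Chars.join [' '] (pvTokens cs)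

theorem pvFoldA (cs : List Char) : ∀ (s : List Char) (b : Bool),
    (cs.foldl pvStepA (s, b)).1 ++ (if (cs.foldl pvStepA (s, b)).2 then ['"'] else [])
      = s ++ pvRawA b cs := by
  induction cs with
  | nil => intro s b; cases b <;> simp [pvRawA]
  | cons c cs ih =>
    intro s b
    by_cases h : c.toNat < 0x20 <;> cases b <;>
      simp [pvStepA, pvRawA, h, ih]

theorem pvTokens_nil : pvTokens [] = [] := by simp [pvTokens]

theorem pvTokens_ctrl (c : Char) (cs : List Char) (h : c.toNat < 0x20) :
    pvTokens (c :: cs) = pvEscTok c :: pvTokens cs := by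
  rw [pvTokens.eq_def]; simp [h]

theorem pvTokens_norm (c : Char) (cs : List Char) (h : ¬ c.toNat < 0x20) :
    pvTokens (c :: cs)
      = ('"' :: c :: cs.takeWhile (fun x => !(x.toNat < 0x20)) ++ ['"'])
        :: pvTokens (cs.dropWhile (fun x => !(x.toNat < 0x20))) := by
  rw [pvTokens.eq_def]; simp [h]

theorem pvTokens_eq_nil_iff (cs : List Char) : pvTokens cs = [] ↔ cs = [] := by
  cases cs with
  | nil => simp [pvTokens_nil]
  | cons c cs =>
    by_cases h : c.toNat < 0x20
    · rw [pvTokens_ctrl c cs h]; simp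
    · rw [pvTokens_norm c cs h]; simp

theorem pvJoin_cons (t : List Char) (ts : List (List Char)) :
    PySem.Chars.join [' '] (t :: ts)
      = t ++ (if ts = [] then [] else ' ' :: PySem.Chars.join [' '] ts) := by
  cases ts with
  | nil => simp [PySem.Chars.join_singleton]
  | cons q r => rw [PySem.Chars.join_cons_cons]; simp

theorem pvJ_ctrl (c : Char) (cs : List Char) (h : c.toNat < 0x20) :
    pvJ (c :: cs) = pvEscTok c ++ (if cs = [] then [] else ' ' :: pvJ cs) := by
  rw [pvJ, pvTokens_ctrl c cs h, pvJoin_cons]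
  by_cases h0 : cs = [] <;> simp [h0, pvTokens_eq_nil_iff, pvJ]

theorem pvJ_norm (c : Char) (cs : List Char) (h : ¬ c.toNat < 0x20) :
    pvJ (c :: cs)
      = '"' :: c :: cs.takeWhile (fun x => !(x.toNat < 0x20)) ++ ['"']
        ++ (if cs.dropWhile (fun x => !(x.toNat < 0x20)) = [] then []
            else ' ' :: pvJ (cs.dropWhile (fun x => !(x.toNat < 0x20)))) := by
  rw [pvJ, pvTokens_norm c cs h, pvJoin_cons]
  by_cases h0 : cs.dropWhile (fun x => !(x.toNat < 0x20)) = [] <;>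
    simp [h0, pvTokens_eq_nil_iff, pvJ]

theorem pvTail_cons (c : Char) (cs : List Char) (h : cs ≠ []) :
    pvTail (c :: cs) = pvTail cs := by
  cases cs with
  | nil => exact absurd rfl h
  | cons d ds => rfl

theorem pvTail_append (x cs : List Char) (h : cs ≠ []) :
    pvTail (x ++ cs) = pvTail cs := by
  induction x with
  | nil => rfl
  | cons a x ih =>
    have hx : x ++ cs ≠ [] := by simp [h]
    rw [List.cons_append, pvTail_cons a (x ++ cs) hx, ih]

theorem pvTail_all_normal (cs : List Char) (h : ∀ x ∈ cs, ¬ x.toNat < 0x20) :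
    pvTail cs = [] := by
  induction cs with
  | nil => rfl
  | cons c cs ih =>
    cases cs with
    | nil => simpa [pvTail] using h c (by simp)
    | cons d ds =>
      rw [pvTail_cons c (d :: ds) (by simp)]
      exact ih fun x hx => h x (by simp [hx])

theorem pvMain : ∀ (n : Nat) (cs : List Char), cs.length ≤ n →
    (pvRawA false cs = pvJ cs ++ pvTail cs) ∧
    (pvRawA true cs
      = cs.takeWhile (fun x => !(x.toNat < 0x20)) ++ ['"']
        ++ (if cs.dropWhile (fun x => !(x.toNat < 0x20)) = [] then []
            else ' ' :: pvRawA false (cs.dropWhile (fun x => !(x.toNat < 0x20))))) := by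
  intro n
  induction n with
  | zero =>
    intro cs hcs
    have : cs = [] := List.eq_nil_of_length_eq_zero (Nat.le_zero.mp hcs)
    subst this
    constructor <;> simp [pvRawA, pvJ, pvTokens_nil, pvTail, PySem.Chars.join_nil]
  | succ n ih =>
    intro cs hcs
    cases cs with
    | nil => constructor <;> simp [pvRawA, pvJ, pvTokens_nil, pvTail, PySem.Chars.join_nil]
    | cons c cs' =>
      have hlen : cs'.length ≤ n := by simpa using hcs
      by_cases h : c.toNat < 0x20
      · constructor
        · -- false, control head
          rw [pvRawA, if_pos h, if_neg (Bool.false_ne_true), pvJ_ctrl c cs' h]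
          by_cases h0 : cs' = []
          · subst h0
            simp [pvRawA, pvTail, pvEscTok, h]
          · rw [if_neg h0, (ih cs' hlen).1, pvTail_cons c cs' h0]
            simp [pvEscTok]
        · -- true, control head
          rw [pvRawA, if_pos h, if_pos rfl]
          have hd : List.dropWhile (fun x => !(x.toNat < 0x20)) (c :: cs') = c :: cs' := by
            rw [List.dropWhile_cons]; simp [h]
          rw [List.takeWhile_cons]
          simp only [h, decide_true, Bool.not_true, hd]
          rw [if_neg (by simp : (c :: cs') ≠ [])]
          rw [pvRawA, if_pos h, if_neg (Bool.false_ne_true)]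
          simp
      · -- normal head
        have htw : List.takeWhile (fun x => !(x.toNat < 0x20)) (c :: cs')
            = c :: List.takeWhile (fun x => !(x.toNat < 0x20)) cs' := by
          rw [List.takeWhile_cons]; simp [h]
        have hdw : List.dropWhile (fun x => !(x.toNat < 0x20)) (c :: cs')
            = List.dropWhile (fun x => !(x.toNat < 0x20)) cs' := by
          rw [List.dropWhile_cons]; simp [h]
        have hT := (ih cs' hlen).2
        constructor
        · rw [pvRawA, if_neg h, if_neg (Bool.false_ne_true), hT, pvJ_norm c cs' h]
          set dw := List.dropWhile (fun x => !(x.toNat < 0x20)) cs' with hdwdef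
          by_cases h0 : dw = []
          · rw [if_pos h0, if_pos h0]
            have htail : pvTail (c :: cs') = [] := by
              apply pvTail_all_normal
              intro x hx
              rcases List.mem_cons.mp hx with rfl | hx'
              · exact h
              · simpa using (List.dropWhile_eq_nil_iff).mp h0 x hx'
            rw [htail]
            simp
          · rw [if_neg h0, if_neg h0]
            have hlen2 : dw.length ≤ n :=
              le_trans (List.length_dropWhile_le _ cs') hlen
            have htail : pvTail (c :: cs') = pvTail dw := by
              have hsplit : c :: cs'
                  = (c :: List.takeWhile (fun x => !(x.toNat < 0x20)) cs') ++ dw := by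
                simp [hdwdef, List.takeWhile_append_dropWhile]
              rw [hsplit, pvTail_append _ _ h0]
            rw [(ih dw hlen2).1, htail]
            simp
        · rw [pvRawA, if_neg h, if_pos rfl, htw, hdw, hT]
          simp

-- head and last of B's joined result are '"'
theorem pvJ_quoted : ∀ (n : Nat) (cs : List Char), cs.length ≤ n → cs ≠ [] →
    (∃ t, pvJ cs = '"' :: t) ∧ (∃ u, pvJ cs = u ++ ['"']) := by
  intro n
  induction n with
  | zero =>
    intro cs hcs hne
    exact absurd (List.eq_nil_of_length_eq_zero (Nat.le_zero.mp hcs)) hne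
  | succ n ih =>
    intro cs hcs hne
    cases cs with
    | nil => exact absurd rfl hne
    | cons c cs' =>
      have hlen : cs'.length ≤ n := by simpa using hcs
      by_cases h : c.toNat < 0x20
      · rw [pvJ_ctrl c cs' h]
        by_cases h0 : cs' = []
        · rw [if_pos h0]
          exact ⟨⟨'\\' :: 'x' :: pvHex2 c ++ ['"'], by simp [pvEscTok]⟩,
                 ⟨'"' :: '\\' :: 'x' :: pvHex2 c, by simp [pvEscTok]⟩⟩
        · rw [if_neg h0]
          obtain ⟨-, u, hu⟩ := ih cs' hlen h0
          refine ⟨⟨'\\' :: 'x' :: pvHex2 c ++ ['"'] ++ ' ' :: pvJ cs', by simp [pvEscTok]⟩,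
                 ⟨pvEscTok c ++ ' ' :: u, ?_⟩⟩
          rw [hu]; simp
      · rw [pvJ_norm c cs' h]
        set dw := List.dropWhile (fun x => !(x.toNat < 0x20)) cs' with hdwdef
        set tw := List.takeWhile (fun x => !(x.toNat < 0x20)) cs' with htwdef
        by_cases h0 : dw = []
        · rw [if_pos h0]
          exact ⟨⟨c :: tw ++ ['"'] ++ [], by simp⟩, ⟨'"' :: c :: tw, by simp⟩⟩
        · rw [if_neg h0]
          have hlen2 : dw.length ≤ n :=
            le_trans (List.length_dropWhile_le _ cs') hlen
          obtain ⟨-, u, hu⟩ := ih dw hlen2 h0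
          refine ⟨⟨c :: tw ++ ['"'] ++ ' ' :: pvJ dw, by simp⟩,
                 ⟨'"' :: c :: tw ++ ['"'] ++ ' ' :: u, ?_⟩⟩
          rw [hu]; simp

theorem pvStrip_quoted (x t u tail : List Char)
    (hh : x = '"' :: t) (hl : x = u ++ ['"']) (htail : tail = [] ∨ tail = [' ']) :
    PySem.Chars.strip (x ++ tail) = x := by
  have hsq : PySem.Chars.isspace '"' = false := by decide
  have hss : PySem.Chars.isspace ' ' = true := by decide
  have h1 : PySem.Chars.lstrip (x ++ tail) = x ++ tail := by
    rw [hh]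
    simp [PySem.Chars.lstrip, hsq]
  rw [PySem.Chars.strip, h1]
  rcases htail with rfl | rfl
  · rw [hl]
    simp [PySem.Chars.rstrip, hsq]
  · rw [hl]
    simp [PySem.Chars.rstrip, hsq, hss]

theorem pvTail_cases (cs : List Char) : pvTail cs = [] ∨ pvTail cs = [' '] := by
  induction cs with
  | nil => left; rfl
  | cons c cs ih =>
    cases cs with
    | nil =>
      by_cases h : c.toNat < 0x20
      · right; simp [pvTail, h]
      · left; simp [pvTail, h]
    | cons d ds => rw [pvTail_cons c (d :: ds) (by simp)]; exact ih

-- ===== VERDICT (by name: the statement is the Claim_ definition above) =====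
theorem compressed_name_to_c_string_spec : Claim_equal_compressed_name_to_c_string := by
  intro s _
  unfold Spec_compressed_name_to_c_string
  unfold compressed_name_to_c_string compressed_name_to_c_string_alt
  simp only []
  set cs := s.toList with hcs
  have hfold := pvFoldA cs [] false
  simp only [List.nil_append] at hfold
  have hr1 : (if (cs.foldl pvStepA ([], false)).2
      then (cs.foldl pvStepA ([], false)).1 ++ ['"']
      else (cs.foldl pvStepA ([], false)).1) = pvRawA false cs := by
    rw [← hfold]; cases (cs.foldl pvStepA ([], false)).2 <;> simp
  rw [hr1]
  by_cases h0 : cs = []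
  · rw [h0]
    simp [pvRawA, pvJ, pvTokens_nil, PySem.Chars.join_nil, PySem.Chars.strip,
      PySem.Chars.lstrip, PySem.Chars.rstrip]
  · have hraw := (pvMain cs.length cs le_rfl).1
    obtain ⟨⟨t, hh⟩, ⟨u, hl⟩⟩ := pvJ_quoted cs.length cs le_rfl h0
    rw [hraw, pvStrip_quoted (pvJ cs) t u (pvTail cs) hh hl (pvTail_cases cs)]
    rfl
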